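-- pv_equiv track=rewrite | github.com/Kritik2310/Serendipidity-1113 | backend/agents/note_parser.py | _select_notes
-- ===== SOURCE A (Python) =====
-- MAX_NOTES = 10
--
-- CATEGORY_PRIORITY = ["Physician", "Nursing/Other", "Nursing"]
--
-- def _select_notes(notes: list[dict]) -> list[dict]:
--     """
--     Pick up to MAX_NOTES notes, prioritising by clinical weight.
--     """
--     buckets: dict[str, list] = {cat: [] for cat in CATEGORY_PRIORITY}
--     other: list[dict] = []
--
--     for note in notes:
--         cat = note.get("category", "")
--         if cat in buckets:
--             buckets[cat].append(note)
--         else: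
--             other.append(note)
--
--     # Slots
--     limits = {"Physician": 4, "Nursing/Other": 3, "Nursing": 3}
--     selected: list[dict] = []
--
--     for cat in CATEGORY_PRIORITY:
--         pool = buckets[cat]
--         selected.extend(pool[-limits[cat]:])
--
--     # Fill remaining slots with any uncategorised notes
--     remaining = MAX_NOTES - len(selected)
--     if remaining > 0:
--         selected.extend(other[-remaining:])
--
--     return selected[:MAX_NOTES]
-- ===== SOURCE B (Python) =====
-- MAX_NOTES = 10
--
-- CATEGORY_PRIORITY = ["Physician", "Nursing/Other", "Nursing"]
--
-- def _select_notes(notes: list[dict]) -> list[dict]: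
--     """Pick up to MAX_NOTES notes, prioritising by clinical weight."""
--     limits = {"Physician": 4, "Nursing/Other": 3, "Nursing": 3}
--     selected: list[dict] = []
--     for cat in CATEGORY_PRIORITY:
--         pool = [n for n in notes if n.get("category", "") == cat]
--         selected.extend(pool[-limits[cat]:])
--     other = [n for n in notes if n.get("category", "") not in CATEGORY_PRIORITY]
--     remaining = MAX_NOTES - len(selected)
--     if remaining > 0:
--         selected.extend(other[-remaining:])
--     return selected[:MAX_NOTES]
-- ===== Notes on version B (the rewrite author's own statement) =====
-- stated objective: simpler
-- what changed: B drops A's dict-of-buckets and its pair-state bucketing pass entirely: it takes the last limits[cat] notes of a per-category filtered scan for each priority category, then fills remaining slots from a filtered scan of uncategorised notes.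
import Mathlib
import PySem

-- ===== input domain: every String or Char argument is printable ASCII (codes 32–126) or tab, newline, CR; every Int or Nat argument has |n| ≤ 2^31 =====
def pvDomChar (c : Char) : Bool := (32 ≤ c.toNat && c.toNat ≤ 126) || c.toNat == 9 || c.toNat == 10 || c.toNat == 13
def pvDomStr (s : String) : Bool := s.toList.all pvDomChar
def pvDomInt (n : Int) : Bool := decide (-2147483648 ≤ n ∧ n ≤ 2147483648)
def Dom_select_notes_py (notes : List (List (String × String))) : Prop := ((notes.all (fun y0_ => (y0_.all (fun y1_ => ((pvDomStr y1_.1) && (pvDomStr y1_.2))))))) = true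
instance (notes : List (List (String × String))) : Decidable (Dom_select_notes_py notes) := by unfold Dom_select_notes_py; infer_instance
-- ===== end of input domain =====

-- B replaces A's dict-bucketing pass by one filtered scan per priority category (simpler: no dict, no pair-state loop); same return value.

-- note.get("category", "") on the dict `note`
def pvGetCat (note : List (String × String)) : String :=
  (PySem.Dict.ofList note).getD "category" ""

-- CATEGORY_PRIORITY
def pvCats : List String := ["Physician", "Nursing/Other", "Nursing"]

-- limits[cat] (keys are exactly pvCats, so the total getD is exact where A's limits[cat] is reached)
def pvLimit (cat : String) : Int :=
  (PySem.Dict.ofList [("Physician", (4 : Int)), ("Nursing/Other", 3), ("Nursing", 3)]).getD cat 0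

-- ===== PORT A =====
def select_notes_py (notes : List (List (String × String))) : List (List (String × String)) :=
  let init : PySem.Dict String (List (List (String × String))) :=
    PySem.Dict.ofList (pvCats.map (fun c => (c, [])))
  let st := notes.foldl
    (fun (st : PySem.Dict String (List (List (String × String))) × List (List (String × String))) note =>
      let cat := pvGetCat note
      if st.1.contains cat then (st.1.modify cat [] (· ++ [note]), st.2)
      else (st.1, st.2 ++ [note]))
    (init, [])
  let selected := pvCats.foldl
    (fun sel c =>
      let pool := st.1.getD c []
      sel ++ PySem.List.slice pool (some (-(pvLimit c))) none) []
  let remaining : Int := 10 - selected.length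
  let selected := if remaining > 0 then selected ++ PySem.List.slice st.2 (some (-remaining)) none else selected
  PySem.List.slice selected none (some 10)

-- ===== PORT B =====
def select_notes_py_alt (notes : List (List (String × String))) : List (List (String × String)) :=
  let selected := pvCats.foldl
    (fun sel c =>
      let pool := notes.filter (fun n => pvGetCat n == c)
      sel ++ PySem.List.slice pool (some (-(pvLimit c))) none) []
  let other := notes.filter (fun n => !(pvCats.contains (pvGetCat n)))
  let remaining : Int := 10 - selected.length
  let selected := if remaining > 0 then selected ++ PySem.List.slice other (some (-remaining)) none else selected
  PySem.List.slice selected none (some 10)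

-- ===== PRECONDITION & SPEC =====
def Spec_select_notes_py (notes : List (List (String × String))) (out : List (List (String × String))) : Prop := out = select_notes_py_alt notes
instance (notes : List (List (String × String))) (out : List (List (String × String))) : Decidable (Spec_select_notes_py notes out) := by unfold Spec_select_notes_py; infer_instance

-- ===== CLAIM (what is proved, stated in full; the proofs are below) =====
def Claim_equal_select_notes_py : Prop := ∀ (notes : List (List (String × String))), Dom_select_notes_py notes → Spec_select_notes_py notes (select_notes_py notes)

-- ===== LEMMAS AND PROOFS =====

-- A's bucketing loop, unrolled: buckets receive the in-category notes (as a modify-fold), other the rest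
theorem pv_loop_eq (notes : List (List (String × String)))
    (d : PySem.Dict String (List (List (String × String)))) (oth : List (List (String × String)))
    (hd : ∀ k, d.contains k = pvCats.contains k) :
    notes.foldl
      (fun (st : PySem.Dict String (List (List (String × String))) × List (List (String × String))) note =>
        let cat := pvGetCat note
        if st.1.contains cat then (st.1.modify cat [] (· ++ [note]), st.2)
        else (st.1, st.2 ++ [note]))
      (d, oth)
    = (((notes.filter (fun n => pvCats.contains (pvGetCat n))).map (fun n => (pvGetCat n, n))).foldl
          (fun d p => d.modify p.1 [] (· ++ [p.2])) d,
       oth ++ notes.filter (fun n => !(pvCats.contains (pvGetCat n)))) := by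
  induction notes generalizing d oth with
  | nil => simp
  | cons n ns ih =>
    simp only [List.foldl_cons, List.filter_cons]
    by_cases h : pvCats.contains (pvGetCat n) = true
    · have h' : pvGetCat n ∈ pvCats := by simpa using h
      rw [if_pos (show d.contains (pvGetCat n) = true by rw [hd]; exact h)]
      have hcont : ∀ k, (d.modify (pvGetCat n) [] (· ++ [n])).contains k = pvCats.contains k := by
        intro k
        rw [PySem.Dict.contains_modify, hd]
        by_cases hk : k = pvGetCat n
        · subst hk; simp [h']
        · simp [hk]
      rw [ih _ oth hcont]
      simp [h']
    · rw [if_neg (show ¬ d.contains (pvGetCat n) = true by rw [hd]; exact h)]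
      rw [ih d (oth ++ [n]) hd]
      have h' : pvGetCat n ∉ pvCats := by simpa using h
      simp [h']


theorem pv_beq_swap (a k : String) : (a == k) = decide (k = a) := by
  rw [Bool.eq_iff_iff, beq_iff_eq, decide_eq_true_iff]
  exact eq_comm

-- the initial bucket dict {cat: [] for cat in CATEGORY_PRIORITY} has exactly pvCats as keys
theorem pv_init_contains (k : String) :
    (PySem.Dict.ofList (pvCats.map (fun c => ((c : String), ([] : List (List (String × String))))))).contains k
      = pvCats.contains k := by
  rw [show PySem.Dict.ofList (pvCats.map (fun c => ((c : String), ([] : List (List (String × String))))))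
      = PySem.Dict.mk [("Physician", []), ("Nursing/Other", []), ("Nursing", [])] from rfl]
  simp [PySem.Dict.contains_mk, pvCats, pv_beq_swap]

-- its values are all []
theorem pv_init_getD (k : String) :
    (PySem.Dict.ofList (pvCats.map (fun c => ((c : String), ([] : List (List (String × String))))))).getD k []
      = [] := by
  rw [show PySem.Dict.ofList (pvCats.map (fun c => ((c : String), ([] : List (List (String × String))))))
      = PySem.Dict.mk [("Physician", []), ("Nursing/Other", []), ("Nursing", [])] from rfl]
  simp only [PySem.Dict.getD_eq_get?_getD, PySem.Dict.get?_mk_cons]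
  split_ifs <;> simp [PySem.Dict.get?]

-- filtering the in-priority notes again by one priority category is the plain category filter
theorem pv_filter_collapse (notes : List (List (String × String))) (c : String)
    (hc : c ∈ pvCats) :
    (notes.filter (fun n => pvCats.contains (pvGetCat n))).filter (fun n => pvGetCat n == c)
      = notes.filter (fun n => pvGetCat n == c) := by
  rw [List.filter_filter]
  apply List.filter_congr
  intro n _
  cases hq : (pvGetCat n == c)
  · simp
  · have : pvGetCat n = c := by simpa using hq
    simp [this, hc]

-- the bucket for a priority category is the category filter of the input
theorem pv_bucket (notes : List (List (String × String))) (c : String) (hc : c ∈ pvCats) :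
    (((notes.filter (fun n => pvCats.contains (pvGetCat n))).map (fun n => (pvGetCat n, n))).foldl
        (fun d p => d.modify p.1 [] (· ++ [p.2]))
        (PySem.Dict.ofList (pvCats.map (fun c => (c, []))))).getD c []
      = notes.filter (fun n => pvGetCat n == c) := by
  rw [PySem.Dict.getD_foldl_modify_append, pv_init_getD, List.nil_append,
      List.filter_map, List.map_map]
  have h1 : ((fun (p : String × List (String × String)) => p.1 == c) ∘ (fun n => (pvGetCat n, n)))
      = fun n => pvGetCat n == c := rfl
  have h2 : ((fun (p : String × List (String × String)) => p.2) ∘ (fun n => (pvGetCat n, n)))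
      = id := rfl
  rw [h1, h2, List.map_id, pv_filter_collapse notes c hc]

-- ===== VERDICT (by name: the statement is the Claim_ definition above) =====
theorem select_notes_py_spec : Claim_equal_select_notes_py := by
  intro notes _
  unfold Spec_select_notes_py select_notes_py select_notes_py_alt
  simp only []
  rw [pv_loop_eq notes _ [] pv_init_contains]
  simp only [List.nil_append]
  have hsel : pvCats.foldl
      (fun sel c =>
        sel ++ PySem.List.slice ((((notes.filter (fun n => pvCats.contains (pvGetCat n))).map (fun n => (pvGetCat n, n))).foldl
            (fun d p => d.modify p.1 [] (· ++ [p.2]))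
            (PySem.Dict.ofList (pvCats.map (fun c => (c, []))))).getD c []) (some (-(pvLimit c))) none) []
      = pvCats.foldl
      (fun sel c =>
        sel ++ PySem.List.slice (notes.filter (fun n => pvGetCat n == c)) (some (-(pvLimit c))) none) [] := by
    apply PySem.List.foldl_congr_mem
    intro acc c hc
    rw [pv_bucket notes c hc]
  rw [hsel]
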